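-- pv_equiv track=rewrite | github.com/shepgoba/6502asm | Reader.py | separateTokens
-- ===== SOURCE A (Python) =====
-- def separateTokens(line):
-- 	tokens = []
-- 	lastIndex = 0
-- 	foundComment = False
--
-- 	for i in range(len(line)):
-- 		if line[i] == ';':
-- 			slicedLine = line[lastIndex:i]
-- 			if slicedLine.strip():
-- 				tokens.append(slicedLine)
-- 			#lastIndex = i + 1
-- 			foundComment = True
-- 			break
-- 		if line[i] == ' ' or line[i] == ',':
-- 			slicedLine = line[lastIndex:i]
-- 			if slicedLine:
-- 				tokens.append(slicedLine)
-- 			lastIndex = i + 1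
--
-- 	if not foundComment:
-- 		tokens.append(line[lastIndex:len(line)])
-- 	if tokens == [] or tokens == ['']:
-- 		return None
-- 	return tokens
-- ===== SOURCE B (Python) =====
-- def separateTokens(line):
-- 	c = line.find(';')
-- 	prefix = line if c == -1 else line[:c]
-- 	parts = []
-- 	cur = ''
-- 	for ch in prefix:
-- 		if ch == ' ' or ch == ',':
-- 			parts.append(cur)
-- 			cur = ''
-- 		else:
-- 			cur += ch
-- 	tokens = [p for p in parts if p]
-- 	if c == -1:
-- 		tokens.append(cur)
-- 	elif cur.strip():
-- 		tokens.append(cur)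
-- 	if tokens == [] or tokens == ['']:
-- 		return None
-- 	return tokens
-- ===== Notes on version B (the rewrite author's own statement) =====
-- stated objective: alternative
-- what changed: A interleaves comment detection with tokenization in one indexed loop carrying lastIndex/foundComment and a break; B first locates the comment with str.find, then splits the comment-free prefix in a single accumulator pass and filters empty parts, handling only the final segment specially.
import Mathlib
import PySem

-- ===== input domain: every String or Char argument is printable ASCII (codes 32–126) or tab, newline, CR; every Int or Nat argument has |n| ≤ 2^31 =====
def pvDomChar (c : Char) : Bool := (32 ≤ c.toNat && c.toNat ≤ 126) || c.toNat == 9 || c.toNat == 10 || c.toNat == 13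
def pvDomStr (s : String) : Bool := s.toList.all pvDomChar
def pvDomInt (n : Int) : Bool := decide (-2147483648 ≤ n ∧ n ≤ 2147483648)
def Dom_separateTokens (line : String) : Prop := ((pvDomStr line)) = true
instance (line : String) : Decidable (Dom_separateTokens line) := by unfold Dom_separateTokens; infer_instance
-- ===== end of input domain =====

-- B replaces A's index/slice scan with find-the-comment-first, then a single split of the prefix (different decomposition, same cost).

-- ===== PORT A =====
-- A's for-loop with break, state (tokens, lastIndex, foundComment), index i over range(len(line)).
def pvA_loop (cs : List Char) (n : Nat) (i : Nat) (tokens : List String) (lastIndex : Nat) :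
    List String × Nat × Bool :=
  if _h : i < n then
    let c := PySem.List.pyGetD cs (i : Int) ' '   -- line[i]; i is in range, so never raises
    if c = ';' then
      let slicedLine := PySem.List.slice cs (some (lastIndex : Int)) (some (i : Int))
      (if PySem.Chars.strip slicedLine ≠ [] then tokens ++ [String.ofList slicedLine] else tokens,
       lastIndex, true)
    else if c = ' ' ∨ c = ',' then
      let slicedLine := PySem.List.slice cs (some (lastIndex : Int)) (some (i : Int))
      pvA_loop cs n (i+1)
        (if slicedLine ≠ [] then tokens ++ [String.ofList slicedLine] else tokens) (i+1)
    else
      pvA_loop cs n (i+1) tokens lastIndex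
  else (tokens, lastIndex, false)
termination_by n - i

def separateTokens (line : String) : Option (List String) :=
  let cs := line.toList
  let n := cs.length
  let r := pvA_loop cs n 0 [] 0
  let tokens :=
    if r.2.2 = false then
      r.1 ++ [String.ofList (PySem.List.slice cs (some (r.2.1 : Int)) (some (n : Int)))]
    else r.1
  if tokens = [] ∨ tokens = [""] then none else some tokens

-- ===== PORT B =====
-- B's for-loop over the comment-free prefix, state (parts, cur).
def pvB_loop (pre : List Char) (parts : List String) (cur : List Char) : List String × List Char :=
  match pre with
  | [] => (parts, cur)
  | ch :: rest =>
    if ch = ' ' ∨ ch = ',' then pvB_loop rest (parts ++ [String.ofList cur]) []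
    else pvB_loop rest parts (cur ++ [ch])

def separateTokens_alt (line : String) : Option (List String) :=
  let c := PySem.Str.find line ";"
  let pre := if c = -1 then line.toList else PySem.List.slice line.toList none (some c)
  let r := pvB_loop pre [] []
  let tokens := r.1.filter (fun p => p ≠ "")
  let tokens :=
    if c = -1 then tokens ++ [String.ofList r.2]
    else if PySem.Chars.strip r.2 ≠ [] then tokens ++ [String.ofList r.2]
    else tokens
  if tokens = [] ∨ tokens = [""] then none else some tokens

-- ===== PRECONDITION & SPEC =====
def Spec_separateTokens (line : String) (out : Option (List String)) : Prop := out = separateTokens_alt line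
instance (line : String) (out : Option (List String)) : Decidable (Spec_separateTokens line out) := by unfold Spec_separateTokens; infer_instance

-- ===== CLAIM (what is proved, stated in full; the proofs are below) =====
def Claim_equal_separateTokens : Prop := ∀ (line : String), Dom_separateTokens line → Spec_separateTokens line (separateTokens line)

-- ===== LEMMAS AND PROOFS =====

-- Reference token list: gA cur rest = the tokens both programs still emit when the
-- pending segment is cur and the unread characters are rest.
def gA (cur : List Char) : List Char → List String
  | [] => [String.ofList cur]
  | c :: rest =>
    if c = ';' then (if PySem.Chars.strip cur ≠ [] then [String.ofList cur] else [])
    else if c = ' ' ∨ c = ',' then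
      (if cur ≠ [] then [String.ofList cur] else []) ++ gA [] rest
    else gA (cur ++ [c]) rest

theorem ofList_eq_empty_iff (cur : List Char) : String.ofList cur = "" ↔ cur = [] := by
  constructor
  · intro h; have := congrArg String.toList h; simpa using this
  · rintro rfl; rfl

theorem singleton_prefix_drop_iff (x : Char) (l : List Char) (i : Nat) (hi : i < l.length) :
    [x] <+: l.drop i ↔ l[i] = x := by
  constructor
  · intro h
    rcases h with ⟨t, ht⟩
    have : (l.drop i)[0]? = some x := by rw [← ht]; rfl
    rw [List.getElem?_drop] at this
    have : l[i]? = some x := by simpa using this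
    simpa [List.getElem?_eq_getElem hi] using this
  · intro h
    refine ⟨l.drop (i+1), ?_⟩
    rw [List.drop_eq_getElem_cons hi, h]
    rfl

theorem slice_succ (cs : List Char) (l i : Nat) (h1 : l ≤ i) (h2 : i < cs.length) :
    PySem.List.slice cs (some ((i:Int))) (some ((i:Int)+1)) = [cs[i]] ∧
    PySem.List.slice cs (some (l:Int)) (some ((i:Int)+1))
      = PySem.List.slice cs (some (l:Int)) (some (i:Int)) ++ [cs[i]] := by
  have hcast : ((i:Int)+1) = ((i+1 : Nat) : Int) := by push_cast; ring
  rw [hcast, PySem.List.slice_natCast, PySem.List.slice_natCast, PySem.List.slice_natCast]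
  constructor
  · rw [show i+1-i = 1 by omega]
    rw [List.take_one, List.head?_drop, List.getElem?_eq_getElem h2]
    rfl
  · rw [show i+1-l = (i-l)+1 by omega, List.take_add_one]
    congr 1
    rw [List.getElem?_drop]
    simp [show l + (i - l) = i by omega, List.getElem?_eq_getElem h2]

-- A's loop (plus its post-loop append) emits exactly the reference tokens.
theorem A_loop_spec (cs : List Char) : ∀ (k i l : Nat) (tokens : List String),
    cs.length - i ≤ k → l ≤ i → i ≤ cs.length →
    (let r := pvA_loop cs cs.length i tokens l
     if r.2.2 = false then
       r.1 ++ [String.ofList (PySem.List.slice cs (some (r.2.1 : Int)) (some (cs.length : Int)))]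
     else r.1)
    = tokens ++ gA (PySem.List.slice cs (some (l:Int)) (some (i:Int))) (cs.drop i) := by
  intro k
  induction k with
  | zero =>
    intro i l tokens hk h1 h2
    have hi : i = cs.length := by omega
    subst hi
    rw [pvA_loop]
    simp [gA]
  | succ k ih =>
    intro i l tokens hk h1 h2
    by_cases hlt : i < cs.length
    · rw [pvA_loop]
      simp only [hlt, dif_pos]
      have hget : PySem.List.pyGetD cs (i : Int) ' ' = cs[i] := by
        rw [PySem.List.pyGetD_natCast, List.getD_eq_getElem?_getD,
            List.getElem?_eq_getElem hlt]
        rfl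
      rw [hget]
      have hdrop : cs.drop i = cs[i] :: cs.drop (i+1) := List.drop_eq_getElem_cons hlt
      by_cases hsemi : cs[i] = ';'
      · rw [hdrop, hsemi]
        simp only [gA, if_true]
        by_cases hst : PySem.Chars.strip (PySem.List.slice cs (some (l:Int)) (some (i:Int))) ≠ []
        · simp [hst]
        · simp [hst]
      · by_cases hdelim : cs[i] = ' ' ∨ cs[i] = ','
        · rw [if_neg hsemi, if_pos hdelim]
          rw [ih (i+1) (i+1) _ (by omega) (by omega) (by omega)]
          have hsl : PySem.List.slice cs (some ((i+1:Nat):Int)) (some ((i+1:Nat):Int)) = [] := by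
            rw [PySem.List.slice_natCast]; simp
          rw [hsl, hdrop]
          conv_rhs => rw [gA]
          rw [if_neg hsemi, if_pos hdelim]
          by_cases hne : PySem.List.slice cs (some (l:Int)) (some (i:Int)) ≠ []
          · simp [hne]
          · simp [hne]
        · rw [if_neg hsemi, if_neg hdelim]
          rw [ih (i+1) l _ (by omega) (by omega) (by omega)]
          have hs2 := (slice_succ cs l i h1 hlt).2
          have hcast : ((i+1 : Nat) : Int) = (i:Int)+1 := by push_cast; ring
          rw [hcast, hs2, hdrop]
          conv_rhs => rw [gA]
          rw [if_neg hsemi, if_neg hdelim]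
    · have hi : i = cs.length := by omega
      subst hi
      rw [pvA_loop]
      simp [gA]

-- B's split of a comment-free prefix, completed with the unconditional append,
-- emits the reference tokens of the whole (comment-free) line.
theorem B_loop_nocomment : ∀ (pre : List Char) (parts : List String) (cur : List Char),
    (';' ∉ pre) →
    (pvB_loop pre parts cur).1.filter (fun p => p ≠ "") ++ [String.ofList (pvB_loop pre parts cur).2]
    = parts.filter (fun p => p ≠ "") ++ gA cur pre := by
  intro pre
  induction pre with
  | nil => intro parts cur _; simp [pvB_loop, gA]
  | cons c rest ih =>
    intro parts cur hc
    have hcne : c ≠ ';' := fun h => hc (h ▸ List.mem_cons_self)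
    have hrest : ';' ∉ rest := fun h => hc (List.mem_cons_of_mem _ h)
    by_cases hdelim : c = ' ' ∨ c = ','
    · rw [pvB_loop]
      simp only [hdelim, if_pos]
      rw [ih _ _ hrest]
      simp only [gA, hcne, if_neg, not_false_iff, hdelim, if_pos]
      rw [List.filter_append]
      by_cases hne : cur = []
      · subst hne; simp
      · have : String.ofList cur ≠ "" := fun h => hne ((ofList_eq_empty_iff cur).mp h)
        simp [hne, this]
    · rw [pvB_loop]
      simp only [hdelim, if_neg, not_false_iff]
      rw [ih _ _ hrest]
      simp only [gA, hcne, hdelim, if_neg, not_false_iff]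

-- Same, when a comment follows the prefix: the final segment is kept only if it strips nonempty.
theorem B_loop_comment : ∀ (pre : List Char) (parts : List String) (cur junk : List Char),
    (';' ∉ pre) →
    (if PySem.Chars.strip (pvB_loop pre parts cur).2 ≠ [] then
        (pvB_loop pre parts cur).1.filter (fun p => p ≠ "") ++
          [String.ofList (pvB_loop pre parts cur).2]
      else (pvB_loop pre parts cur).1.filter (fun p => p ≠ ""))
    = parts.filter (fun p => p ≠ "") ++ gA cur (pre ++ ';' :: junk) := by
  intro pre
  induction pre with
  | nil =>
    intro parts cur junk _
    simp only [pvB_loop, List.nil_append, gA]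
    by_cases hst : PySem.Chars.strip cur ≠ []
    · simp [hst]
    · simp [hst]
  | cons c rest ih =>
    intro parts cur junk hc
    have hcne : c ≠ ';' := fun h => hc (h ▸ List.mem_cons_self)
    have hrest : ';' ∉ rest := fun h => hc (List.mem_cons_of_mem _ h)
    by_cases hdelim : c = ' ' ∨ c = ','
    · rw [pvB_loop]
      simp only [hdelim, if_pos]
      rw [ih _ _ junk hrest]
      simp only [List.cons_append, gA, hcne, if_neg, not_false_iff, hdelim, if_pos]
      rw [List.filter_append]
      by_cases hne : cur = []
      · subst hne; simp
      · have : String.ofList cur ≠ "" := fun h => hne ((ofList_eq_empty_iff cur).mp h)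
        simp [hne, this]
    · rw [pvB_loop]
      simp only [hdelim, if_neg, not_false_iff]
      rw [ih _ _ junk hrest]
      simp only [List.cons_append, gA, hcne, hdelim, if_neg, not_false_iff]

-- ===== VERDICT (by name: the statement is the Claim_ definition above) =====
theorem separateTokens_spec : Claim_equal_separateTokens := by
  intro line _
  unfold Spec_separateTokens
  simp only [separateTokens, separateTokens_alt]
  set cs := line.toList with hcs
  have hA := A_loop_spec cs cs.length 0 0 [] (by omega) (by omega) (by omega)
  have hsl0 : PySem.List.slice cs (some ((0:Nat):Int)) (some ((0:Nat):Int)) = [] := by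
    rw [PySem.List.slice_natCast]; simp
  rw [hsl0, List.drop_zero, List.nil_append] at hA
  simp only at hA
  have hfind : PySem.Str.find line ";" = PySem.Chars.find cs [';'] := by
    rw [PySem.Str.find_eq]; rfl
  rw [hfind]
  by_cases hcase : PySem.Chars.find cs [';'] = -1
  · -- no comment anywhere
    have hnot : ';' ∉ cs := by
      have := (PySem.Chars.find_eq_neg_one_iff cs [';']).mp hcase
      intro hmem
      exact this ((List.singleton_infix_iff ';' cs).mpr hmem)
    have hB := B_loop_nocomment cs [] [] hnot
    simp only [List.filter_nil, List.nil_append] at hB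
    rw [hcase, if_pos rfl, if_pos rfl, hB, hA]
  · -- comment: the first ';' sits at index k = (find cs [';']).toNat
    rw [if_neg hcase, if_neg hcase]
    have hspec := PySem.Chars.findFrom_natCast_spec cs [';'] 0 (by omega)
      (by simp only [Nat.cast_zero, PySem.Chars.findFrom_zero]; exact_mod_cast hcase)
    simp only [Nat.cast_zero, PySem.Chars.findFrom_zero] at hspec
    obtain ⟨hge, hpref, hmin⟩ := hspec
    set f := PySem.Chars.find cs [';'] with hf
    set k := f.toNat with hk
    have hge0 : (0:Int) ≤ f := by exact_mod_cast hge
    have hklen : k < cs.length := by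
      rcases hpref with ⟨t, ht⟩
      have hlen := congrArg List.length ht
      simp [List.length_drop] at hlen ⊢
      omega
    have hsemi : cs[k] = ';' := (singleton_prefix_drop_iff ';' cs k hklen).mp hpref
    have htakeno : ';' ∉ cs.take k := by
      intro hmem
      rcases List.mem_take_iff_getElem.mp hmem with ⟨j, hj, hget⟩
      have hjk : j < k := by omega
      have hnp : ¬ [';'] <+: cs.drop j := hmin j (by omega) hjk
      exact hnp ((singleton_prefix_drop_iff ';' cs j (by omega)).mpr hget)
    have hsplit : cs = cs.take k ++ ';' :: cs.drop (k+1) := by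
      conv_lhs => rw [← List.take_append_drop k cs]
      rw [List.drop_eq_getElem_cons hklen, hsemi]
    have hpre : PySem.List.slice cs none (some f) = cs.take k := PySem.List.slice_to cs hge0
    have hB := B_loop_comment (cs.take k) [] [] (cs.drop (k+1)) htakeno
    simp only [List.filter_nil, List.nil_append] at hB
    rw [hpre, hB, hA]
    conv_lhs => rw [hsplit]
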